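-- pv_equiv track=rewrite | github.com/Thomas4390/pdf_extractor | src/app/main.py | sort_and_filter_boards
-- ===== SOURCE A (Python) =====
-- def sort_and_filter_boards(boards: list, search_query: str = "") -> list:
--     """Sort boards with priority keywords first and filter by search query."""
--     if not boards:
--         return []
--
--     filtered_boards = boards
--     if search_query and search_query.strip():
--         search_lower = search_query.lower().strip()
--         filtered_boards = [b for b in boards if search_lower in b['name'].lower()]
--
--     priority_1_keywords = ['paiement', 'historique']
--     priority_2_keywords = ['vente', 'production']
--
--     def get_priority(board_name: str) -> tuple:
--         name_lower = board_name.lower()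
--         if any(kw in name_lower for kw in priority_1_keywords):
--             return (0, name_lower)
--         if any(kw in name_lower for kw in priority_2_keywords):
--             return (1, name_lower)
--         return (2, name_lower)
--
--     return sorted(filtered_boards, key=lambda b: get_priority(b['name']))
-- ===== SOURCE B (Python) =====
-- def sort_and_filter_boards(boards: list, search_query: str = "") -> list:
--     """Sort boards with priority keywords first and filter by search query.
--     One pass distributes boards into three priority buckets; each bucket is
--     then stably sorted by lowercased name alone and the buckets concatenated."""
--     if not boards:
--         return []
--
--     filtered_boards = boards
--     if search_query and search_query.strip():
--         search_lower = search_query.lower().strip()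
--         filtered_boards = [b for b in boards if search_lower in b['name'].lower()]
--
--     bucket1, bucket2, bucket3 = [], [], []
--     for b in filtered_boards:
--         name_lower = b['name'].lower()
--         if 'paiement' in name_lower or 'historique' in name_lower:
--             bucket1.append(b)
--         elif 'vente' in name_lower or 'production' in name_lower:
--             bucket2.append(b)
--         else:
--             bucket3.append(b)
--
--     key = lambda b: b['name'].lower()
--     bucket1.sort(key=key)
--     bucket2.sort(key=key)
--     bucket3.sort(key=key)
--     return bucket1 + bucket2 + bucket3
-- ===== Notes on version B (the rewrite author's own statement) =====
-- stated objective: alternative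
-- what changed: Replaces the single stable sort keyed by the (priority, lowercased-name) tuple with a one-pass three-way bucket split by priority class followed by three independent stable sorts keyed by the lowercased name alone, concatenated.
-- outside the precondition, e.g. on sort_and_filter_boards([{'title': 'x'}], ''): A raises KeyError, B raises KeyError
import Mathlib
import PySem

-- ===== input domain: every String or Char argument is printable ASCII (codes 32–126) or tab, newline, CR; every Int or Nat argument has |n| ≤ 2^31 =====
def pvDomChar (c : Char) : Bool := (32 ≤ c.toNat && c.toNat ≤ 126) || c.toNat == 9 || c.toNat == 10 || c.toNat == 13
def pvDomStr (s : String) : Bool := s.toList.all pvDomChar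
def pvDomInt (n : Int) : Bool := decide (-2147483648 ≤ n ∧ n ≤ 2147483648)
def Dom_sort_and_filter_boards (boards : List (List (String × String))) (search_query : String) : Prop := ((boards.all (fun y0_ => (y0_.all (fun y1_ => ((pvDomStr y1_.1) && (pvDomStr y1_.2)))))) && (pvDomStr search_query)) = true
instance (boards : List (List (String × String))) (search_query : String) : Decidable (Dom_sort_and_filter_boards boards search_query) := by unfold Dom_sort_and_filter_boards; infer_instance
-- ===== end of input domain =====

-- B replaces the single tuple-key sort by a one-pass three-way bucket split followed by three
-- name-only stable sorts (objective: alternative decomposition; equal value on all admitted inputs).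


-- ===== PORT A =====
-- b['name'].lower(); the .getD "" default is never reached under Pre_ (every board has a 'name' key)
def pvNameLower (b : List (String × String)) : String :=
  PySem.Str.lower (((PySem.Dict.mk b).get? "name").getD "")

-- the filter step, identical in A and in B (both Pythons share it verbatim)
def pvFilteredBoards (boards : List (List (String × String))) (search_query : String) :
    List (List (String × String)) :=
  if search_query.toList ≠ [] ∧ (PySem.Str.strip search_query).toList ≠ [] then
    let search_lower := PySem.Str.strip (PySem.Str.lower search_query)
    boards.filter (fun b => PySem.Str.isIn search_lower (pvNameLower b))
  else boards

-- A's get_priority helper: (priority, name_lower)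
def pvGetPriority (board_name : String) : Int × String :=
  let name_lower := PySem.Str.lower board_name
  if ["paiement", "historique"].any (fun kw => PySem.Str.isIn kw name_lower) then (0, name_lower)
  else if ["vente", "production"].any (fun kw => PySem.Str.isIn kw name_lower) then (1, name_lower)
  else (2, name_lower)

def sort_and_filter_boards (boards : List (List (String × String))) (search_query : String) :
    List (List (String × String)) :=
  if boards = [] then []
  else
    PySem.List.sorted2 (pvFilteredBoards boards search_query)
      (fun b => (pvGetPriority (((PySem.Dict.mk b).get? "name").getD "")).1)
      (fun b => (pvGetPriority (((PySem.Dict.mk b).get? "name").getD "")).2)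

-- ===== PORT B =====
-- one pass distributing the filtered boards into the three priority buckets
def pvBuckets (filtered : List (List (String × String))) :
    List (List (String × String)) × List (List (String × String)) × List (List (String × String)) :=
  filtered.foldl
    (fun acc b =>
      let name_lower := pvNameLower b
      if PySem.Str.isIn "paiement" name_lower || PySem.Str.isIn "historique" name_lower then
        (acc.1 ++ [b], acc.2.1, acc.2.2)
      else if PySem.Str.isIn "vente" name_lower || PySem.Str.isIn "production" name_lower then
        (acc.1, acc.2.1 ++ [b], acc.2.2)
      else (acc.1, acc.2.1, acc.2.2 ++ [b]))
    ([], [], [])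

def sort_and_filter_boards_alt (boards : List (List (String × String))) (search_query : String) :
    List (List (String × String)) :=
  if boards = [] then []
  else
    let bs := pvBuckets (pvFilteredBoards boards search_query)
    PySem.List.sorted bs.1 pvNameLower ++ PySem.List.sorted bs.2.1 pvNameLower ++
      PySem.List.sorted bs.2.2 pvNameLower

-- ===== PRECONDITION & SPEC =====
-- Pre_ excludes boards missing a 'name' key: there the Python A raises KeyError (returns no value).
def Pre_sort_and_filter_boards (boards : List (List (String × String))) (search_query : String) : Prop :=
  ∀ b ∈ boards, ((PySem.Dict.mk b).get? "name").isSome = true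

instance (boards : List (List (String × String))) (search_query : String) :
    Decidable (Pre_sort_and_filter_boards boards search_query) := by
  unfold Pre_sort_and_filter_boards; infer_instance

def pvWitness_sort_and_filter_boards : (List (List (String × String))) × String :=
  ([[("name", "Ventes 2024")], [("name", "Paiement")], [("name", "misc")]], "")

def Spec_sort_and_filter_boards (boards : List (List (String × String))) (search_query : String) (out : List (List (String × String))) : Prop := out = sort_and_filter_boards_alt boards search_query
instance (boards : List (List (String × String))) (search_query : String) (out : List (List (String × String))) : Decidable (Spec_sort_and_filter_boards boards search_query out) := by unfold Spec_sort_and_filter_boards; infer_instance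

-- ===== CLAIM (what is proved, stated in full; the proofs are below) =====
def Claim_equal_sort_and_filter_boards : Prop := ∀ (boards : List (List (String × String))) (search_query : String), Dom_sort_and_filter_boards boards search_query → Pre_sort_and_filter_boards boards search_query → Spec_sort_and_filter_boards boards search_query (sort_and_filter_boards boards search_query)

-- ===== LEMMAS AND PROOFS =====

-- the priority class of a board, as A's key computes it
def pvPrio (b : List (String × String)) : Int :=
  ((pvGetPriority (((PySem.Dict.mk b).get? "name").getD "")).1)

lemma pvGetPriority_snd (s : String) : (pvGetPriority s).2 = PySem.Str.lower s := by
  unfold pvGetPriority; dsimp only; split_ifs <;> rfl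

lemma pvPrio_cases (b : List (String × String)) : pvPrio b = 0 ∨ pvPrio b = 1 ∨ pvPrio b = 2 := by
  unfold pvPrio pvGetPriority; dsimp only; split_ifs <;> simp

-- skip a prefix x is never inserted before
lemma insertBy_append_left {α : Type} (before : α → α → Bool) (x : α) (ys zs : List α)
    (h : ∀ y ∈ ys, before x y = false) :
    PySem.List.insertBy before x (ys ++ zs) = ys ++ PySem.List.insertBy before x zs := by
  induction ys with
  | nil => rfl
  | cons y ys ih =>
    have hy : before x y = false := h y (by simp)
    simp [PySem.List.insertBy, hy, ih (fun y hy => h y (by simp [hy]))]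

-- on ys before1 agrees with before2, and x goes before everything in zs
lemma insertBy_congr_append {α : Type} (before1 before2 : α → α → Bool) (x : α) (ys zs : List α)
    (h1 : ∀ y ∈ ys, before1 x y = before2 x y) (h2 : ∀ z ∈ zs, before1 x z = true) :
    PySem.List.insertBy before1 x (ys ++ zs) = PySem.List.insertBy before2 x ys ++ zs := by
  induction ys with
  | nil =>
    cases zs with
    | nil => rfl
    | cons z zs => simp [PySem.List.insertBy, h2 z (by simp)]
  | cons y ys ih =>
    have hy : before1 x y = before2 x y := h1 y (by simp)
    by_cases hb : before2 x y = true
    · simp [PySem.List.insertBy, hy, hb]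
    · simp only [List.cons_append, PySem.List.insertBy, hy,
        Bool.not_eq_true] at *
      simp [hb, ih (fun y hy => h1 y (by simp [hy]))]

-- A's lexicographic insertion order
def pvLex (a b : List (String × String)) : Bool :=
  decide (pvPrio a < pvPrio b) || (!decide (pvPrio b < pvPrio a) && decide (pvNameLower a < pvNameLower b))

def pvName (a b : List (String × String)) : Bool := decide (pvNameLower a < pvNameLower b)

lemma pvLex_eq_pvName_of_eq {a b : List (String × String)} (h : pvPrio a = pvPrio b) :
    pvLex a b = pvName a b := by
  simp [pvLex, pvName, h]

lemma pvLex_false_of_gt {a b : List (String × String)} (h : pvPrio b < pvPrio a) :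
    pvLex a b = false := by
  simp [pvLex, h]; omega

lemma pvLex_true_of_lt {a b : List (String × String)} (h : pvPrio a < pvPrio b) :
    pvLex a b = true := by
  simp [pvLex, h]

-- one insertion step: inserting x into the concatenation of the three sorted buckets
lemma insert_step (x : List (String × String)) (s0 s1 s2 : List (List (String × String)))
    (h0 : ∀ y ∈ s0, pvPrio y = 0) (h1 : ∀ y ∈ s1, pvPrio y = 1) (h2 : ∀ y ∈ s2, pvPrio y = 2) :
    PySem.List.insertBy pvLex x (s0 ++ s1 ++ s2) =
      if pvPrio x = 0 then PySem.List.insertBy pvName x s0 ++ s1 ++ s2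
      else if pvPrio x = 1 then s0 ++ PySem.List.insertBy pvName x s1 ++ s2
      else s0 ++ s1 ++ PySem.List.insertBy pvName x s2 := by
  rcases pvPrio_cases x with hp | hp | hp
  · rw [List.append_assoc, insertBy_congr_append pvLex pvName x s0 (s1 ++ s2)
      (fun y hy => pvLex_eq_pvName_of_eq (by rw [hp, h0 y hy]))
      (fun z hz => by
        rcases List.mem_append.mp hz with hz | hz
        · exact pvLex_true_of_lt (by rw [hp, h1 z hz]; norm_num)
        · exact pvLex_true_of_lt (by rw [hp, h2 z hz]; norm_num))]
    simp [hp, List.append_assoc]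
  · rw [List.append_assoc, insertBy_append_left pvLex x s0 (s1 ++ s2)
      (fun y hy => pvLex_false_of_gt (by rw [hp, h0 y hy]; norm_num)),
      insertBy_congr_append pvLex pvName x s1 s2
      (fun y hy => pvLex_eq_pvName_of_eq (by rw [hp, h1 y hy]))
      (fun z hz => pvLex_true_of_lt (by rw [hp, h2 z hz]; norm_num))]
    simp [hp, List.append_assoc]
  · rw [List.append_assoc, insertBy_append_left pvLex x s0 (s1 ++ s2)
      (fun y hy => pvLex_false_of_gt (by rw [hp, h0 y hy]; norm_num)),
      insertBy_append_left pvLex x s1 s2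
      (fun y hy => pvLex_false_of_gt (by rw [hp, h1 y hy]; norm_num))]
    have h22 : PySem.List.insertBy pvLex x s2 = PySem.List.insertBy pvName x s2 := by
      have := insertBy_congr_append pvLex pvName x s2 []
        (fun y hy => pvLex_eq_pvName_of_eq (by rw [hp, h2 y hy])) (by simp)
      simpa using this
    rw [h22]
    simp [hp, List.append_assoc]

-- the three bucket predicates, in terms of pvPrio
lemma pvPrio_eq_zero_iff (b : List (String × String)) :
    pvPrio b = 0 ↔ (PySem.Str.isIn "paiement" (pvNameLower b) || PySem.Str.isIn "historique" (pvNameLower b)) = true := by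
  unfold pvPrio pvGetPriority pvNameLower
  dsimp only
  split_ifs with hA hB <;> simp_all

lemma pvPrio_eq_one_iff (b : List (String × String)) :
    pvPrio b = 1 ↔ ((!(PySem.Str.isIn "paiement" (pvNameLower b) || PySem.Str.isIn "historique" (pvNameLower b))) && (PySem.Str.isIn "vente" (pvNameLower b) || PySem.Str.isIn "production" (pvNameLower b))) = true := by
  unfold pvPrio pvGetPriority pvNameLower
  dsimp only
  split_ifs with hA hB
  · simp_all
    intro h1 h2
    simp_all
  · simp_all
  · simp_all

-- B's buckets are the pvPrio-filters of the input, in order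
lemma pvBuckets_eq (filtered : List (List (String × String))) :
    pvBuckets filtered =
      (filtered.filter (fun b => decide (pvPrio b = 0)),
       filtered.filter (fun b => decide (pvPrio b = 1)),
       filtered.filter (fun b => decide (pvPrio b = 2))) := by
  have key : ∀ (l : List (List (String × String))) (a0 a1 a2 : List (List (String × String))),
      l.foldl
        (fun acc b =>
          let name_lower := pvNameLower b
          if PySem.Str.isIn "paiement" name_lower || PySem.Str.isIn "historique" name_lower then
            (acc.1 ++ [b], acc.2.1, acc.2.2)
          else if PySem.Str.isIn "vente" name_lower || PySem.Str.isIn "production" name_lower then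
            (acc.1, acc.2.1 ++ [b], acc.2.2)
          else (acc.1, acc.2.1, acc.2.2 ++ [b]))
        (a0, a1, a2) =
      (a0 ++ l.filter (fun b => decide (pvPrio b = 0)),
       a1 ++ l.filter (fun b => decide (pvPrio b = 1)),
       a2 ++ l.filter (fun b => decide (pvPrio b = 2))) := by
    intro l
    induction l with
    | nil => simp
    | cons x l ih =>
      intro a0 a1 a2
      simp only [List.foldl_cons]
      by_cases hA : (PySem.Str.isIn "paiement" (pvNameLower x) || PySem.Str.isIn "historique" (pvNameLower x)) = true
      · have hp : pvPrio x = 0 := (pvPrio_eq_zero_iff x).mpr hA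
        rw [if_pos hA, ih]
        simp [hp]
      · by_cases hB : (PySem.Str.isIn "vente" (pvNameLower x) || PySem.Str.isIn "production" (pvNameLower x)) = true
        · have hp : pvPrio x = 1 := (pvPrio_eq_one_iff x).mpr (by simp_all)
          rw [if_neg hA, if_pos hB, ih]
          simp [hp]
        · have hp : pvPrio x = 2 := by
            rcases pvPrio_cases x with h | h | h
            · exact absurd ((pvPrio_eq_zero_iff x).mp h) hA
            · have := (pvPrio_eq_one_iff x).mp h
              simp only [Bool.and_eq_true] at this
              exact absurd this.2 hB
            · exact h
          rw [if_neg hA, if_neg hB, ih]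
          simp [hp]
  unfold pvBuckets
  rw [key filtered [] [] []]
  simp only [List.nil_append]

-- the heart: the tuple-key stable sort is the concatenation of the three per-bucket name sorts
lemma sorted2_eq_buckets (l : List (List (String × String))) :
    PySem.List.sorted2 l pvPrio pvNameLower =
      PySem.List.sorted (l.filter (fun b => decide (pvPrio b = 0))) pvNameLower ++
      PySem.List.sorted (l.filter (fun b => decide (pvPrio b = 1))) pvNameLower ++
      PySem.List.sorted (l.filter (fun b => decide (pvPrio b = 2))) pvNameLower := by
  induction l using List.reverseRecOn with
  | nil => rfl
  | append_singleton l x ih =>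
    have hmem : ∀ (i : Int) (y : List (String × String)),
        y ∈ PySem.List.sorted (l.filter (fun b => decide (pvPrio b = i))) pvNameLower → pvPrio y = i := by
      intro i y hy
      have := (PySem.List.mem_sorted _ _ _ _).mp hy
      simpa using (List.mem_filter.mp this).2
    have step : PySem.List.sorted2 (l ++ [x]) pvPrio pvNameLower =
        PySem.List.insertBy pvLex x (PySem.List.sorted2 l pvPrio pvNameLower) := by
      unfold PySem.List.sorted2
      simp only [List.foldl_append, List.foldl_cons, List.foldl_nil]
      rfl
    have stepN : ∀ (m : List (List (String × String))),
        PySem.List.sorted (m ++ [x]) pvNameLower =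
          PySem.List.insertBy pvName x (PySem.List.sorted m pvNameLower) := by
      intro m
      rw [PySem.List.sorted_eq_foldl_insertBy, PySem.List.sorted_eq_foldl_insertBy]
      simp only [List.foldl_append, List.foldl_cons, List.foldl_nil]
      rfl
    rw [step, ih, insert_step x _ _ _ (hmem 0) (hmem 1) (hmem 2)]
    rcases pvPrio_cases x with hp | hp | hp <;>
      simp [hp, List.filter_append, stepN]

-- port A, unfolded to sorted2 over pvPrio / pvNameLower
lemma portA_eq (boards : List (List (String × String))) (search_query : String) (h : boards ≠ []) :
    sort_and_filter_boards boards search_query =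
      PySem.List.sorted2 (pvFilteredBoards boards search_query) pvPrio pvNameLower := by
  unfold sort_and_filter_boards
  rw [if_neg h]
  have : (fun b : List (String × String) => (pvGetPriority (((PySem.Dict.mk b).get? "name").getD "")).2) = pvNameLower := by
    funext b; rw [pvGetPriority_snd]; rfl
  rw [this]; rfl

-- ===== VERDICT (by name: the statement is the Claim_ definition above) =====
theorem sort_and_filter_boards_spec : Claim_equal_sort_and_filter_boards := by
  intro boards search_query _ _
  unfold Spec_sort_and_filter_boards sort_and_filter_boards_alt
  by_cases h : boards = []
  · simp [h, sort_and_filter_boards]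
  · rw [if_neg h, portA_eq boards search_query h, sorted2_eq_buckets, pvBuckets_eq]
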